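-- pv_equiv track=rewrite | github.com/MrBrantCode/unitest_baseline | mut_generate/mist_train_cf/cf_69723/solution.py | is_happy
-- ===== SOURCE A (Python) =====
-- def is_happy(s):
--     if len(s) < 3:
--         return False
--
--     freq = {}
--     repeat = 0
--     distinct = set()
--
--     for i in range(len(s)):
--         if i > 0 and s[i] == s[i-1]:
--             return False
--         if s[i] in freq:
--             freq[s[i]] += 1
--         else:
--             freq[s[i]] = 1
--         distinct.add(s[i])
--
--     for k, v in freq.items():
--         if v % 2 != 0:
--             return False
--         if v == 2:
--             repeat += 1
--
--     if repeat < 3 or len(distinct) != len(freq):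
--         return False
--
--     return True
-- ===== SOURCE B (Python) =====
-- def _runs(t):
--     # Run-length encoding: lengths of the maximal blocks of equal consecutive elements.
--     runs = []
--     i = 0
--     n = len(t)
--     while i < n:
--         j = i + 1
--         while j < n and t[j] == t[i]:
--             j += 1
--         runs.append(j - i)
--         i = j
--     return runs
--
--
-- def is_happy(s):
--     if len(s) < 3:
--         return False
--     if any(r > 1 for r in _runs(s)):
--         return False
--     counts = _runs(sorted(s))
--     if any(v % 2 != 0 for v in counts):
--         return False
--     return sum(1 for v in counts if v == 2) >= 3
-- ===== Notes on version B (the rewrite author's own statement) =====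
-- stated objective: alternative
-- what changed: A's single fused index loop maintaining a frequency dict, a distinct set and a repeat counter with early returns is replaced by a run-length-encoding algorithm: adjacency is checked as 'no run longer than 1' on the RLE of s, and per-character frequencies are obtained as the run lengths of sorted(s) (sort-then-scan instead of hash counting), then judged by aggregate any/sum passes; A's vacuous len(distinct)!=len(freq) check disappears.
import Mathlib
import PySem

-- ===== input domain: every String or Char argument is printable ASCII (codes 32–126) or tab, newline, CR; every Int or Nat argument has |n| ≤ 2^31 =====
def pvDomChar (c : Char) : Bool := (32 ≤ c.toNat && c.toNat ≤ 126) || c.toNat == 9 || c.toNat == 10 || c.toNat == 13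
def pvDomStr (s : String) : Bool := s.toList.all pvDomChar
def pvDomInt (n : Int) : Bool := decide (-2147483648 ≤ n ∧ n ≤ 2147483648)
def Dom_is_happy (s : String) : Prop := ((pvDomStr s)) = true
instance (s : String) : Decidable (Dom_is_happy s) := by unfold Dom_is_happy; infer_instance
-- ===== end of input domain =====

-- B replaces A's fused index loop with a hash frequency dict, distinct set and repeat counter by a
-- run-length-encoding algorithm: adjacency = "no run longer than 1" in the RLE of s, and the character
-- frequencies are read off as the run lengths of sorted(s) (sort-then-scan instead of hash counting);
-- objective: alternative algorithm (no speed claim).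

-- ===== PORT A =====
-- first loop of A: 'for i in range(len(s))' with early 'return False' on s[i] == s[i-1];
-- state: freq dict and distinct set; 'none' = the early return was taken.
def isHappyLoop1 (cs : List Char) (i : Nat) (freq : PySem.Dict Char Int)
    (dset : PySem.Set Char) : Option (PySem.Dict Char Int × PySem.Set Char) :=
  if h : i < cs.length then
    let c := cs[i]
    if 0 < i ∧ cs[i]! = cs[i-1]! then none
    else
      isHappyLoop1 cs (i+1)
        (if freq.contains c then freq.modify c 0 (· + 1) else freq.insert c 1)
        (PySem.Set.add dset c)
  else some (freq, dset)
termination_by cs.length - i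

-- second loop of A: 'for k, v in freq.items()' with early 'return False' on odd v; 'none' = early return.
def isHappyLoop2 : List (Char × Int) → Int → Option Int
  | [], r => some r
  | (_, v) :: rest, r =>
    if PySem.Int.mod v 2 ≠ 0 then none
    else isHappyLoop2 rest (if v = 2 then r + 1 else r)

def is_happy (s : String) : Bool :=
  let cs := s.toList
  if cs.length < 3 then false
  else
    match isHappyLoop1 cs 0 PySem.Dict.empty PySem.Set.empty with
    | none => false
    | some (freq, dset) =>
      match isHappyLoop2 freq.items 0 with
      | none => false
      | some rep =>
        if rep < 3 ∨ dset.length ≠ freq.size then false else true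

-- ===== PORT B =====
-- Source B _runs inner while loop: 'j = i + 1; while j < n and t[j] == t[i]: j += 1' (returns the final j)
def runsJ (t : List Char) (i j : Nat) : Nat :=
  if h : j < t.length ∧ t[j]! = t[i]! then runsJ t i (j+1) else j
termination_by t.length - j

theorem runsJ_ge (t : List Char) (i j : Nat) : j ≤ runsJ t i j := by
  rw [runsJ]
  split
  · exact Nat.le_trans (Nat.le_succ j) (runsJ_ge t i (j+1))
  · exact Nat.le_refl j
termination_by t.length - j

-- Source B _runs outer while loop: 'while i < n: j = runsJ…; runs.append(j - i); i = j'
def runsAux (t : List Char) (i : Nat) (acc : List Int) : List Int :=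
  if h : i < t.length then
    let j := runsJ t i (i+1)
    runsAux t j (acc ++ [((j - i : Nat) : Int)])
  else acc
termination_by t.length - i
decreasing_by
  have := runsJ_ge t i (i+1)
  omega

-- Source B _runs(t)
def pyRuns (t : List Char) : List Int := runsAux t 0 []

def is_happy_alt (s : String) : Bool :=
  let cs := s.toList
  if cs.length < 3 then false
  else if (pyRuns cs).any (fun r => decide (1 < r)) then false
  else
    -- sorted(s): Python compares 1-char strings by code point = Char's order
    let counts := pyRuns (PySem.List.sorted cs (fun c => c) false)
    if counts.any (fun v => PySem.Int.mod v 2 != 0) then false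
    else decide (3 ≤ counts.countP (fun v => v == 2))

-- ===== PRECONDITION & SPEC =====
def Spec_is_happy (s : String) (out : Bool) : Prop := out = is_happy_alt s
instance (s : String) (out : Bool) : Decidable (Spec_is_happy s out) := by unfold Spec_is_happy; infer_instance

-- ===== CLAIM (what is proved, stated in full; the proofs are below) =====
def Claim_equal_is_happy : Prop := ∀ (s : String), Dom_is_happy s → Spec_is_happy s (is_happy s)

-- ===== LEMMAS AND PROOFS =====

-- ---------- A-side characterisation ----------

-- structural view of A's first loop: recursion on the remaining characters, carrying the previous one
def isHappyGo (prev : Option Char) (l : List Char) (freq : PySem.Dict Char Int)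
    (dset : PySem.Set Char) : Option (PySem.Dict Char Int × PySem.Set Char) :=
  match l with
  | [] => some (freq, dset)
  | c :: rest =>
    if prev = some c then none
    else isHappyGo (some c) rest
      (if freq.contains c then freq.modify c 0 (· + 1) else freq.insert c 1)
      (PySem.Set.add dset c)

theorem loop1_eq_go (cs : List Char) (i : Nat) (freq : PySem.Dict Char Int)
    (dset : PySem.Set Char) (hi : i ≤ cs.length) :
    isHappyLoop1 cs i freq dset
      = isHappyGo (if h : 0 < i ∧ i - 1 < cs.length then some cs[i-1] else none)
          (cs.drop i) freq dset := by
  generalize hk : cs.length - i = k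
  induction k generalizing i freq dset with
  | zero =>
    have : i = cs.length := by omega
    subst this
    rw [isHappyLoop1]
    simp [isHappyGo]
  | succ k ih =>
    have hlt : i < cs.length := by omega
    have hrec := ih (i+1)
      (if freq.contains cs[i] then freq.modify cs[i] 0 (· + 1) else freq.insert cs[i] 1)
      (PySem.Set.add dset cs[i]) (by omega) (by omega)
    simp only [Nat.add_sub_cancel, dif_pos (And.intro (Nat.succ_pos i) hlt)] at hrec
    rw [isHappyLoop1]
    rw [List.drop_eq_getElem_cons hlt]
    by_cases h0 : 0 < i
    · have hm1 : i - 1 < cs.length := by omega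
      simp only [dif_pos (And.intro h0 hm1)]
      rw [isHappyGo]
      by_cases heq : cs[i]! = cs[i-1]!
      · have hpe : some (cs[i-1] : Char) = some (cs[i] : Char) := by
          rw [getElem!_pos cs i hlt, getElem!_pos cs (i-1) hm1] at heq
          exact congrArg some heq.symm
        simp [dif_pos hlt, h0, heq, hpe]
      · have hpe : ¬ (some (cs[i-1] : Char) = some (cs[i] : Char)) := by
          rw [getElem!_pos cs i hlt, getElem!_pos cs (i-1) hm1] at heq
          simp only [Option.some.injEq]
          exact fun h => heq h.symm
        have hcond : ¬(0 < i ∧ cs[i]! = cs[i-1]!) := fun hh => heq hh.2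
        simp only [dif_pos hlt, if_neg hcond, if_neg hpe]
        exact hrec
    · have hi0 : i = 0 := by omega
      subst hi0
      have hcond : ¬((0:Nat) < 0 ∧ cs[0]! = cs[0-1]!) := fun hh => absurd hh.1 (by omega)
      have hprev : ¬((0:Nat) < 0 ∧ 0 - 1 < cs.length) := fun hh => absurd hh.1 (by omega)
      simp only [dif_pos hlt, dif_neg hprev]
      rw [isHappyGo]
      rw [if_neg (by simp : ¬((none : Option Char) = some (cs[0]'hlt)))]
      exact hrec

-- the one dict-update step of A's loop is Counter's step
theorem upd_eq_modify (d : PySem.Dict Char Int) (c : Char) :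
    (if d.contains c then d.modify c 0 (· + 1) else d.insert c 1) = d.modify c 0 (· + 1) := by
  by_cases h : d.contains c
  · simp [h]
  · have hg : d.get? c = none := by
      simp [PySem.Dict.contains, PySem.Dict.get?] at *
      intro a b hm hac; subst hac; exact h b hm
    simp [h, PySem.Dict.modify, PySem.Dict.getD, hg]

-- 'no two adjacent characters are equal', carrying the previous character
def noRun (prev : Option Char) : List Char → Bool
  | [] => true
  | c :: rest => !(prev = some c) && noRun (some c) rest

theorem go_spec (l : List Char) (prev : Option Char) (freq : PySem.Dict Char Int)
    (dset : PySem.Set Char) :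
    isHappyGo prev l freq dset
      = if noRun prev l
        then some (l.foldl (fun d c => d.modify c 0 (· + 1)) freq,
                   l.foldl PySem.Set.add dset)
        else none := by
  induction l generalizing prev freq dset with
  | nil => simp [isHappyGo, noRun]
  | cons c rest ih =>
    rw [isHappyGo, noRun]
    by_cases hp : prev = some c
    · simp [hp]
    · simp only [if_neg hp, ih, upd_eq_modify, List.foldl_cons]
      simp [hp]

theorem loop2_spec (l : List (Char × Int)) (r : Int) :
    isHappyLoop2 l r
      = if l.any (fun kv => PySem.Int.mod kv.2 2 != 0) then none
        else some (r + (l.countP (fun kv => kv.2 == 2) : Int)) := by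
  induction l generalizing r with
  | nil => simp [isHappyLoop2]
  | cons kv rest ih =>
    obtain ⟨k, v⟩ := kv
    rw [isHappyLoop2]
    by_cases hv : PySem.Int.mod v 2 ≠ 0
    · rw [if_pos hv]
      have hm : PySem.Int.mod v 2 = v % 2 := PySem.Int.mod_eq_emod_of_pos (by norm_num)
      have hc : (((k, v) :: rest).any fun kv => PySem.Int.mod kv.2 2 != 0) = true := by
        simp [bne_iff_ne]
        left
        omega
      rw [if_pos hc]
    · rw [if_neg hv, ih]
      have hv0 : PySem.Int.mod v 2 = 0 := not_not.mp hv
      simp only [List.any_cons, hv0, bne_self_eq_false, Bool.false_or, List.countP_cons]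
      by_cases ha : (rest.any fun kv => PySem.Int.mod kv.2 2 != 0) = true
      · rw [if_pos ha, if_pos ha]
      · rw [if_neg ha, if_neg ha]
        by_cases h2 : v = 2
        · simp [h2]
          omega
        · simp [h2]

-- ---------- B-side characterisation ----------

-- inner while loop: final j = j + length of the block of t[i] starting at j
theorem runsJ_spec (t : List Char) (i j : Nat) (hi : i < t.length) :
    runsJ t i j = j + ((t.drop j).takeWhile (fun x => x == t[i]!)).length := by
  generalize hk : t.length - j = k
  induction k generalizing j with
  | zero =>
    have hj : t.length ≤ j := by omega
    rw [runsJ]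
    have : ¬ (j < t.length ∧ t[j]! = t[i]!) := fun hh => by omega
    rw [dif_neg this, List.drop_eq_nil_of_le hj]
    simp
  | succ k ih =>
    have hj : j < t.length := by omega
    rw [runsJ]
    rw [List.drop_eq_getElem_cons hj]
    by_cases he : t[j]! = t[i]!
    · rw [dif_pos ⟨hj, he⟩, ih (j+1) (by omega)]
      have hbe : ((t[j]'hj) == t[i]!) = true := by
        rw [getElem!_pos t j hj] at he
        simp [he]
      rw [List.takeWhile_cons, hbe]
      simp
      omega
    · rw [dif_neg (fun hh => he hh.2)]
      have hbe : ((t[j]'hj) == t[i]!) = false := by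
        rw [getElem!_pos t j hj] at he
        simpa using he
      rw [List.takeWhile_cons, hbe]
      simp

-- structural view of Source B's _runs: head block length, then recurse on the rest
def runsGo : List Char → List Int
  | [] => []
  | c :: rest =>
    (((rest.takeWhile (fun x => x == c)).length + 1 : Nat) : Int)
      :: runsGo (rest.dropWhile (fun x => x == c))
termination_by l => l.length
decreasing_by
  simp only [List.length_cons]
  exact Nat.lt_succ_of_le (List.dropWhile_sublist _).length_le

theorem dropWhile_eq_drop (l : List Char) (p : Char → Bool) :
    l.dropWhile p = l.drop (l.takeWhile p).length := by
  induction l with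
  | nil => rfl
  | cons c rest ih =>
    rw [List.takeWhile_cons, List.dropWhile_cons]
    cases hp : p c with
    | true => simpa using ih
    | false => simp

theorem runsAux_eq_go (t : List Char) (i : Nat) (acc : List Int) :
    runsAux t i acc = acc ++ runsGo (t.drop i) := by
  rw [runsAux]
  by_cases hi : i < t.length
  · rw [dif_pos hi]
    dsimp only
    have hgi : t[i]! = t[i] := getElem!_pos t i hi
    have hj := runsJ_spec t i (i+1) hi
    rw [hgi] at hj
    have hdi : t.drop i = t[i] :: t.drop (i+1) := List.drop_eq_getElem_cons hi
    have hgo : runsGo (t.drop i)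
        = (((((t.drop (i+1)).takeWhile (fun x => x == t[i])).length + 1 : Nat)) : Int)
          :: runsGo ((t.drop (i+1)).dropWhile (fun x => x == t[i])) := by
      rw [hdi]
      rw [runsGo]
    have hdrop : t.drop (i + 1 + ((t.drop (i+1)).takeWhile (fun x => x == t[i])).length)
        = (t.drop (i+1)).dropWhile (fun x => x == t[i]) := by
      rw [dropWhile_eq_drop, List.drop_drop]
    rw [hj, runsAux_eq_go t _ _, hdrop, hgo]
    have hsub : (i + 1 + ((t.drop (i+1)).takeWhile (fun x => x == t[i])).length - i : Nat)
        = ((t.drop (i+1)).takeWhile (fun x => x == t[i])).length + 1 := by omega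
    rw [hsub]
    simp
  · rw [dif_neg hi, List.drop_eq_nil_of_le (by omega)]
    simp [runsGo]
termination_by t.length - i
decreasing_by omega

theorem pyRuns_eq_go (t : List Char) : pyRuns t = runsAux t 0 [] := rfl

-- adjacency: some run is longer than 1 iff two adjacent characters are equal
theorem runsGo_adj (l : List Char) :
    (runsGo l).any (fun r => decide (1 < r)) = !noRun none l := by
  match l with
  | [] => simp [runsGo, noRun]
  | [c] => simp [runsGo, noRun]
  | c :: d :: rs =>
    rw [runsGo]
    by_cases hdc : d = c
    · subst hdc
      have h1 : (1 : Int) < ((((d :: rs).takeWhile (fun x => x == d)).length + 1 : Nat) : Int) := by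
        rw [List.takeWhile_cons, beq_self_eq_true]
        simp only [if_pos, List.length_cons]
        push_cast
        omega
      simp [noRun, h1]
    · have htw : (d :: rs).takeWhile (fun x => x == c) = [] := by
        rw [List.takeWhile_cons]
        simp [hdc]
      have hdw : (d :: rs).dropWhile (fun x => x == c) = d :: rs := by
        rw [List.dropWhile_cons]
        simp [hdc]
      rw [htw, hdw]
      have ih := runsGo_adj (d :: rs)
      have hcd : ¬ c = d := fun h => hdc h.symm
      simp only [List.any_cons, ih]
      simp [noRun, hcd]
termination_by l.length

-- Set.add of a member is a no-op; of a non-member appends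
theorem set_add_mem (s : PySem.Set Char) (x : Char) (h : x ∈ s) : PySem.Set.add s x = s := by
  simp [PySem.Set.add, PySem.Set.contains, h]

theorem set_add_not_mem (s : PySem.Set Char) (x : Char) (h : x ∉ s) :
    PySem.Set.add s x = s ++ [x] := by
  simp [PySem.Set.add, PySem.Set.contains, h]

-- folding Set.add over elements avoiding x keeps a leading x in place
theorem foldl_add_cons (l : List Char) (s : PySem.Set Char) (x : Char) (hx : x ∉ l) :
    l.foldl PySem.Set.add (x :: s) = x :: l.foldl PySem.Set.add s := by
  induction l generalizing s with
  | nil => rfl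
  | cons y ys ih =>
    have hxy : x ≠ y := fun h => hx (h ▸ List.mem_cons_self)
    have hx' : x ∉ ys := fun h => hx (List.mem_cons_of_mem _ h)
    rw [List.foldl_cons, List.foldl_cons, ← ih _ hx']
    congr 1
    by_cases hm : y ∈ s
    · rw [set_add_mem _ _ hm, set_add_mem _ _ (List.mem_cons_of_mem _ hm)]
    · have hm' : y ∉ (x :: s) := by
        intro h
        rcases List.mem_cons.mp h with h | h
        · exact hxy h.symm
        · exact hm h
      rw [set_add_not_mem _ _ hm, set_add_not_mem _ _ hm']
      rfl

-- folding Set.add over copies of a member is a no-op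
theorem foldl_add_const (l : List Char) (s : PySem.Set Char) (x : Char)
    (hl : ∀ y ∈ l, y = x) (hx : x ∈ s) : l.foldl PySem.Set.add s = s := by
  induction l with
  | nil => rfl
  | cons y ys ih =>
    have hy : y = x := hl y List.mem_cons_self
    rw [List.foldl_cons, hy, set_add_mem _ _ hx]
    exact ih (fun z hz => hl z (List.mem_cons_of_mem _ hz))

-- in a sorted list c :: rest, dropping the leading block of c leaves no c behind
theorem sorted_dropWhile_not_mem (c : Char) (rest : List Char)
    (hs : (c :: rest).Pairwise (· ≤ ·)) : c ∉ rest.dropWhile (fun x => x == c) := by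
  induction rest with
  | nil => simp
  | cons d rs ih =>
    rw [List.dropWhile_cons]
    by_cases hdc : d = c
    · subst hdc
      have hs' : (d :: rs).Pairwise (· ≤ ·) := (List.pairwise_cons.mp hs).2
      simp only [beq_self_eq_true, if_pos]
      exact ih (List.pairwise_cons.mpr ⟨fun z hz => (List.pairwise_cons.mp hs').1 z hz,
        (List.pairwise_cons.mp hs').2⟩)
    · have hbe : (d == c) = false := by simpa using hdc
      rw [hbe]
      simp only [if_neg Bool.false_ne_true]
      have hcd : c ≤ d := (List.pairwise_cons.mp hs).1 d List.mem_cons_self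
      have hlt : c < d := lt_of_le_of_ne hcd (fun h => hdc h.symm)
      intro hmem
      rcases List.mem_cons.mp hmem with h | h
      · exact absurd h.symm hdc
      · have : d ≤ c := by
          have hp := (List.pairwise_cons.mp ((List.pairwise_cons.mp hs).2)).1
          exact hp c h
        exact absurd hlt (not_lt.mpr this)

-- run lengths of a sorted list = the count of each distinct character, in order
theorem runsGo_sorted (t : List Char) (hs : t.Pairwise (· ≤ ·)) :
    runsGo t = (PySem.Set.ofList t).map (fun c => ((t.count c : Nat) : Int)) := by
  match t with
  | [] => simp [runsGo, PySem.Set.ofList]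
  | c :: rest =>
    rw [runsGo]
    have htwc : ∀ y ∈ rest.takeWhile (fun x => x == c), y = c := fun y hy => by
      have := List.mem_takeWhile_imp hy
      simpa using this
    have hsplit : rest = rest.takeWhile (fun x => x == c) ++ rest.dropWhile (fun x => x == c) :=
      (List.takeWhile_append_dropWhile).symm
    have hcnot : c ∉ rest.dropWhile (fun x => x == c) := sorted_dropWhile_not_mem c rest hs
    have hrest'sorted : (rest.dropWhile (fun x => x == c)).Pairwise (· ≤ ·) :=
      ((List.pairwise_cons.mp hs).2).sublist (List.dropWhile_sublist _)
    have hof : PySem.Set.ofList (c :: rest)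
        = c :: PySem.Set.ofList (rest.dropWhile (fun x => x == c)) := by
      show (c :: rest).foldl PySem.Set.add [] = _
      rw [List.foldl_cons]
      have h0 : PySem.Set.add ([] : PySem.Set Char) c = [c] :=
        set_add_not_mem _ _ (List.not_mem_nil)
      rw [h0]
      conv_lhs => rw [hsplit]
      rw [List.foldl_append]
      rw [foldl_add_const _ [c] c htwc List.mem_cons_self]
      exact foldl_add_cons _ [] c hcnot
    rw [hof]
    have hcount_c : (c :: rest).count c = (rest.takeWhile (fun x => x == c)).length + 1 := by
      conv_lhs => rw [hsplit]
      rw [List.count_cons_self, List.count_append]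
      have h1 : (rest.takeWhile (fun x => x == c)).count c
          = (rest.takeWhile (fun x => x == c)).length :=
        List.count_eq_length.mpr (fun y hy => by simp [htwc y hy])
      have h2 : (rest.dropWhile (fun x => x == c)).count c = 0 := List.count_eq_zero.mpr hcnot
      omega
    have hcount_d : ∀ d ∈ PySem.Set.ofList (rest.dropWhile (fun x => x == c)),
        (c :: rest).count d = (rest.dropWhile (fun x => x == c)).count d := by
      intro d hd
      have hdm : d ∈ rest.dropWhile (fun x => x == c) :=
        (PySem.Set.mem_ofList _ d).mp hd
      have hdc : d ≠ c := fun h => hcnot (h ▸ hdm)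
      have h1 : (rest.takeWhile (fun x => x == c)).count d = 0 :=
        List.count_eq_zero.mpr (fun hmem => hdc (htwc d hmem))
      have hsplit_count : rest.count d
          = (rest.takeWhile (fun x => x == c)).count d
            + (rest.dropWhile (fun x => x == c)).count d := by
        conv_lhs => rw [hsplit]
        rw [List.count_append]
      have hbe : (c == d) = false := beq_eq_false_iff_ne.mpr (fun h => hdc h.symm)
      rw [List.count_cons, hsplit_count, h1, hbe]
      simp
    rw [List.map_cons, hcount_c]
    congr 1
    rw [runsGo_sorted (rest.dropWhile (fun x => x == c)) hrest'sorted]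
    exact List.map_congr_left (fun d hd => by rw [hcount_d d hd])
termination_by t.length
decreasing_by
  simp only [List.length_cons]
  exact Nat.lt_succ_of_le (List.dropWhile_sublist _).length_le

-- the distinct elements of a list and of a permutation of it are a permutation
theorem ofList_perm_of_perm (l l' : List Char) (h : l.Perm l') :
    (PySem.Set.ofList l).Perm (PySem.Set.ofList l') := by
  rw [List.perm_iff_count]
  intro a
  have n1 : (PySem.Set.ofList l).Nodup := PySem.Set.nodup_ofList l
  have n2 : (PySem.Set.ofList l').Nodup := PySem.Set.nodup_ofList l'
  by_cases hm : a ∈ l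
  · have hm' : a ∈ l' := h.mem_iff.mp hm
    rw [List.count_eq_one_of_mem n1 ((PySem.Set.mem_ofList l a).mpr hm),
        List.count_eq_one_of_mem n2 ((PySem.Set.mem_ofList l' a).mpr hm')]
  · have hm' : a ∉ l' := fun hh => hm (h.mem_iff.mpr hh)
    rw [List.count_eq_zero.mpr (fun hh => hm ((PySem.Set.mem_ofList l a).mp hh)),
        List.count_eq_zero.mpr (fun hh => hm' ((PySem.Set.mem_ofList l' a).mp hh))]

-- run lengths of sorted(cs) are a permutation of the per-distinct-character counts of cs
theorem runs_sorted_perm_counts (cs : List Char) :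
    (pyRuns (PySem.List.sorted cs (fun c => c) false)).Perm
      ((PySem.Set.ofList cs).map (fun c => ((cs.count c : Nat) : Int))) := by
  have hperm : (PySem.List.sorted cs (fun c => c) false).Perm cs :=
    PySem.List.sorted_perm cs (fun c => c) false
  have hsorted : (PySem.List.sorted cs (fun c => c) false).Pairwise (· ≤ ·) := by
    have := PySem.List.sorted_pairwise (xs := cs) (key := fun c => c)
    simpa using this
  rw [pyRuns_eq_go, runsAux_eq_go]
  simp only [List.drop_zero, List.nil_append]
  rw [runsGo_sorted _ hsorted]
  have h1 : ((PySem.Set.ofList (PySem.List.sorted cs (fun c => c) false)).map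
        (fun c => (((PySem.List.sorted cs (fun c => c) false).count c : Nat) : Int)))
      = ((PySem.Set.ofList (PySem.List.sorted cs (fun c => c) false)).map
        (fun c => ((cs.count c : Nat) : Int))) :=
    List.map_congr_left (fun d _ => by rw [hperm.count_eq])
  rw [h1]
  exact (ofList_perm_of_perm _ cs hperm).map _

-- ===== VERDICT (by name: the statement is the Claim_ definition above) =====
theorem is_happy_spec : Claim_equal_is_happy := by
  intro s _
  unfold Spec_is_happy is_happy is_happy_alt
  by_cases hlen : s.toList.length < 3
  · rw [if_pos hlen, if_pos hlen]
  · rw [if_neg hlen, if_neg hlen]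
    have h1 : isHappyLoop1 s.toList 0 PySem.Dict.empty PySem.Set.empty
        = isHappyGo none s.toList PySem.Dict.empty PySem.Set.empty := by
      have := loop1_eq_go s.toList 0 PySem.Dict.empty PySem.Set.empty (by omega)
      simpa using this
    rw [h1, go_spec]
    have hadj : (pyRuns s.toList).any (fun r => decide (1 < r)) = !noRun none s.toList := by
      rw [pyRuns_eq_go, runsAux_eq_go]
      simp only [List.drop_zero, List.nil_append]
      exact runsGo_adj s.toList
    by_cases hnr : noRun none s.toList = true
    · rw [if_pos hnr]
      have hB1 : ((pyRuns s.toList).any fun r => decide (1 < r)) = false := by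
        rw [hadj, hnr]
        rfl
      rw [hB1, if_neg Bool.false_ne_true]
      have hfreq : s.toList.foldl (fun d c => d.modify c 0 (· + 1)) PySem.Dict.empty
          = PySem.Dict.counter s.toList := (PySem.Dict.counter_eq_foldl s.toList).symm
      have hset : s.toList.foldl PySem.Set.add PySem.Set.empty = PySem.Set.ofList s.toList :=
        (PySem.Set.ofList_eq_foldl s.toList).symm
      rw [hfreq, hset]
      dsimp only
      rw [loop2_spec, PySem.Dict.items_counter]
      have hperm := runs_sorted_perm_counts s.toList
      have hodd_eq : (((PySem.Set.ofList s.toList).map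
            (fun k => ((k, ((s.toList.count k : Nat) : Int)) : Char × Int))).any
              (fun kv => PySem.Int.mod kv.2 2 != 0))
          = ((pyRuns (PySem.List.sorted s.toList (fun c => c) false)).any
              (fun v => PySem.Int.mod v 2 != 0)) := by
        rw [hperm.any_eq]
        simp [List.any_map, Function.comp_def]
      have hcnt_eq : (((PySem.Set.ofList s.toList).map
            (fun k => ((k, ((s.toList.count k : Nat) : Int)) : Char × Int))).countP
              (fun kv => kv.2 == 2))
          = ((pyRuns (PySem.List.sorted s.toList (fun c => c) false)).countP
              (fun v => v == 2)) := by
        rw [hperm.countP_eq]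
        simp [List.countP_map, Function.comp_def]
      by_cases hodd : (((PySem.Set.ofList s.toList).map
            (fun k => ((k, ((s.toList.count k : Nat) : Int)) : Char × Int))).any
              (fun kv => PySem.Int.mod kv.2 2 != 0)) = true
      · rw [if_pos hodd]
        rw [← hodd_eq, hodd]
        rfl
      · rw [if_neg hodd]
        have hodd' : ((pyRuns (PySem.List.sorted s.toList (fun c => c) false)).any
            (fun v => PySem.Int.mod v 2 != 0)) = false := by
          cases hb : ((pyRuns (PySem.List.sorted s.toList (fun c => c) false)).any
              (fun v => PySem.Int.mod v 2 != 0)) with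
          | false => rfl
          | true => exact absurd (by rw [hodd_eq, hb]) hodd
        rw [hodd', if_neg Bool.false_ne_true]
        dsimp only
        have hsz : (PySem.Dict.counter s.toList).size = (PySem.Set.ofList s.toList).length := by
          simp [PySem.Dict.size, PySem.Dict.items_counter]
        rw [hsz, ← hcnt_eq]
        set n := (((PySem.Set.ofList s.toList).map
            (fun k => ((k, ((s.toList.count k : Nat) : Int)) : Char × Int))).countP
              (fun kv => kv.2 == 2)) with hn
        by_cases h3 : (0 : Int) + (n : Int) < 3
        · rw [if_pos (Or.inl h3)]
          have hnn : ¬ (3 ≤ n) := by omega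
          simp [hnn]
        · rw [if_neg (fun hor => hor.elim (fun hlt => absurd hlt h3) (fun hne => hne rfl))]
          have hnn : 3 ≤ n := by omega
          simp [hnn]
    · rw [if_neg hnr]
      have hB1 : ((pyRuns s.toList).any fun r => decide (1 < r)) = true := by
        rw [hadj]
        cases hb : noRun none s.toList with
        | false => rfl
        | true => exact absurd hb hnr
      rw [hB1]
      rfl
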